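-- pv_equiv track=rewrite | github.com/Chriscrosser3310/one_hot_QTT | one_hot_basis.py | ith_gray_onehot
-- ===== SOURCE A (Python) =====
-- def ith_gray_onehot(n: int, q: int, i: int, reverse=True) -> str:
--     """
--     Return the i-th bitstring (0-based) in the reflected-base-q Gray/snake
--     ordering of the q^n one-hot product basis.
--
--     Output layout: [block 0 | block 1 | ... | block n-1], each block length q.
--     Within each block, index 0 is the leftmost bit.
--     """
--     if n <= 0 or q <= 0:
--         raise ValueError("n and q must be positive.")
--     if i < 0 or i >= q**n:
--         raise ValueError(f"i must satisfy 0 <= i < q**n = {q**n}.")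
--
--     # base-q digits d_k, k=0..n-1 (least significant first)
--     d = []
--     x = i
--     for _ in range(n):
--         d.append(x % q)
--         x //= q
--
--     # compute coordinates a_k using parity of more-significant digits
--     a = [0] * n
--     parity = 0  # parity of sum of digits above current k (mod 2), built MSB->LSB
--     for k in range(n - 1, -1, -1):
--         if parity == 0:
--             a[k] = d[k]
--         else:
--             a[k] = (q - 1) - d[k]
--         parity ^= (d[k] & 1)  # update parity with current digit's parity
--
--     # build one-hot blocks
--     blocks = []
--     for k in range(n):
--         bits = ['0'] * q
--         bits[a[k]] = '1'
--         blocks.append(''.join(bits))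
--
--     bitstring = ''.join(blocks)
--     if reverse:
--         return bitstring
--     else:
--         return bitstring[::-1]
-- ===== SOURCE B (Python) =====
-- def ith_gray_onehot(n: int, q: int, i: int, reverse=True) -> str:
--     # Single forward (LSB-first) pass: instead of A's three staged passes
--     # (digit list, downward parity pass into an index array, block pass),
--     # precompute the total digit-sum parity of i with a divmod while-loop, then
--     # walk the digits low-to-high maintaining the parity of the NOT-yet-consumed
--     # (more significant) digits and emit each one-hot block immediately, in
--     # final output order.
--     if n <= 0 or q <= 0:
--         raise ValueError("n and q must be positive.")
--     if i < 0 or i >= q**n: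
--         raise ValueError(f"i must satisfy 0 <= i < q**n = {q**n}.")
--
--     s = 0                     # total digit parity of i (base q)
--     t = i
--     while t:
--         t, r = divmod(t, q)
--         s ^= r & 1
--
--     pieces = []
--     x = i
--     for _ in range(n):
--         x, d = divmod(x, q)
--         s ^= d & 1            # s = parity of the digits strictly above this one
--         a = d if s == 0 else (q - 1) - d
--         pieces.append('0' * a + '1' + '0' * (q - 1 - a))
--
--     bitstring = ''.join(pieces)
--     return bitstring if reverse else bitstring[::-1]
-- ===== Notes on version B (the rewrite author's own statement) =====
-- stated objective: alternative
-- what changed: A does three staged passes (build an LSB-first digit list over range(n), a downward MSB-to-LSB parity pass filling an index array, then a third pass turning that array into blocks); B instead precomputes the total digit-sum parity of i with one divmod while-loop and then runs a single forward LSB-first pass that maintains the parity of the not-yet-consumed higher digits, emitting each one-hot block immediately in final output order with no intermediate digit or index arrays.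
import Mathlib
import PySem

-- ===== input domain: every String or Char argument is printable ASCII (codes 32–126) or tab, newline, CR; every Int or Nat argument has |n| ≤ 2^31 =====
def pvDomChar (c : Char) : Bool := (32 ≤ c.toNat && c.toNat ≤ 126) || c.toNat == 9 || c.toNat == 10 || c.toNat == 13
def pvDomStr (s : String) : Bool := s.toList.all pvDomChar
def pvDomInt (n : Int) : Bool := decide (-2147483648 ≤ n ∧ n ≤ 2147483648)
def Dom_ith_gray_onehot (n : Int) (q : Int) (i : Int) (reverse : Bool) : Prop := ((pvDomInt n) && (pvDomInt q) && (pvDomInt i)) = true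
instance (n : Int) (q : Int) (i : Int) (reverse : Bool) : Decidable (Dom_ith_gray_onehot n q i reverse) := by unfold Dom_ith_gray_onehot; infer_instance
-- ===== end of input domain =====

-- B replaces A's three staged passes (LSB digit list, downward parity pass into an index
-- array, block-building pass) by one divmod loop for the total digit parity of i plus a
-- single forward LSB-first pass that emits each one-hot block in output order; proved equal
-- to A on Pre_.  A's list of 1-char strings for a block is modelled as a List Char; ''.join
-- of it is String.ofList (exact).

-- ===== PORT A =====
def ith_gray_onehot (n : Int) (q : Int) (i : Int) (reverse : Bool) : String :=
  if n ≤ 0 ∨ q ≤ 0 then ""          -- Python: raise ValueError (excluded by Pre_)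
  else if i < 0 ∨ i ≥ q ^ n.toNat then ""  -- Python: raise ValueError (excluded by Pre_)
  else
    -- d = []; x = i; for _ in range(n): d.append(x % q); x //= q
    let dx := (PySem.List.pyRange 0 n 1).foldl
      (fun (st : List Int × Int) _ =>
        (st.1 ++ [PySem.Int.mod st.2 q], PySem.Int.floordiv st.2 q)) ([], i)
    let d := dx.1
    -- a = [0]*n; parity = 0; for k in range(n-1,-1,-1): ...
    let ap := (PySem.List.pyRange (n - 1) (-1) (-1)).foldl
      (fun (st : List Int × Int) k =>
        let dk := PySem.List.pyGetD d k 0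
        let av := if st.2 == 0 then dk else (q - 1) - dk
        (PySem.List.pySetD st.1 k av, PySem.Int.bxor st.2 (PySem.Int.band dk 1)))
      (List.replicate n.toNat 0, 0)
    let a := ap.1
    -- blocks = []; for k in range(n): bits = ['0']*q; bits[a[k]] = '1'; blocks.append(''.join(bits))
    let blocks := (PySem.List.pyRange 0 n 1).foldl
      (fun (bs : List String) k =>
        let bits := PySem.List.pySetD (List.replicate q.toNat '0') (PySem.List.pyGetD a k 0) '1'
        bs ++ [String.ofList bits]) []
    let bitstring := PySem.Str.join "" blocks
    if reverse then bitstring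
    else (PySem.Str.slice? bitstring none none (-1)).getD ""

-- ===== PORT B =====
-- '0'*a + '1' + '0'*(q-1-a)
def pvOnehot (q : Int) (a : Int) : String :=
  String.ofList (List.replicate a.toNat '0' ++ '1' :: List.replicate (q - 1 - a).toNat '0')

-- s = 0; t = i; while t: t, r = divmod(t, q); s ^= r & 1
-- (the 1 < q conjunct only makes the recursion well-founded; under Pre_ the loop
--  is never entered when q = 1, since then i = 0)
def pvParityAux (q : Int) (t : Int) (s : Int) : Int :=
  if 0 < t ∧ 1 < q then
    pvParityAux q (PySem.Int.floordiv t q)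
      (PySem.Int.bxor s (PySem.Int.band (PySem.Int.mod t q) 1))
  else s
termination_by t.toNat
decreasing_by
  rename_i h
  rw [PySem.Int.floordiv_eq_ediv_of_pos (by omega)]
  have h2 : t / q < t := by
    apply Int.ediv_lt_of_lt_mul (by omega)
    nlinarith [h.1, h.2]
  omega

def ith_gray_onehot_alt (n : Int) (q : Int) (i : Int) (reverse : Bool) : String :=
  if n ≤ 0 ∨ q ≤ 0 then ""          -- Python: raise ValueError (excluded by Pre_)
  else if i < 0 ∨ i ≥ q ^ n.toNat then ""  -- Python: raise ValueError (excluded by Pre_)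
  else
    let s0 := pvParityAux q i 0
    -- pieces = []; x = i; for _ in range(n): x, d = divmod(x, q); s ^= d & 1; ...
    let st := (PySem.List.pyRange 0 n 1).foldl
      (fun (st : List String × Int × Int) _ =>
        let d := PySem.Int.mod st.2.1 q
        let x' := PySem.Int.floordiv st.2.1 q
        let s' := PySem.Int.bxor st.2.2 (PySem.Int.band d 1)
        let a := if s' == 0 then d else (q - 1) - d
        (st.1 ++ [pvOnehot q a], x', s')) ([], i, s0)
    let bitstring := PySem.Str.join "" st.1
    if reverse then bitstring
    else String.ofList bitstring.toList.reverse

-- ===== PRECONDITION & SPEC =====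
-- Pre_ is exactly where Python A returns (both ValueError guards pass); A raises outside it.
def Pre_ith_gray_onehot (n : Int) (q : Int) (i : Int) (reverse : Bool) : Prop :=
  0 < n ∧ 0 < q ∧ 0 ≤ i ∧ i < q ^ n.toNat
instance (n : Int) (q : Int) (i : Int) (reverse : Bool) : Decidable (Pre_ith_gray_onehot n q i reverse) := by unfold Pre_ith_gray_onehot; infer_instance

def pvWitness_ith_gray_onehot : Int × Int × Int × Bool := (3, 3, 14, true)

def Spec_ith_gray_onehot (n : Int) (q : Int) (i : Int) (reverse : Bool) (out : String) : Prop := out = ith_gray_onehot_alt n q i reverse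
instance (n : Int) (q : Int) (i : Int) (reverse : Bool) (out : String) : Decidable (Spec_ith_gray_onehot n q i reverse out) := by unfold Spec_ith_gray_onehot; infer_instance

-- ===== CLAIM (what is proved, stated in full; the proofs are below) =====
def Claim_equal_ith_gray_onehot : Prop := ∀ (n : Int) (q : Int) (i : Int) (reverse : Bool), Dom_ith_gray_onehot n q i reverse → Pre_ith_gray_onehot n q i reverse → Spec_ith_gray_onehot n q i reverse (ith_gray_onehot n q i reverse)

-- ===== LEMMAS AND PROOFS =====

-- bit values (parities are always 0 or 1)
def pvBit (a : Int) : Prop := a = 0 ∨ a = 1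

lemma pvBit_band (d : Int) : pvBit (PySem.Int.band d 1) := by
  rw [PySem.Int.band_one, PySem.Int.mod_eq_emod_of_pos (by norm_num)]
  have h1 := Int.emod_nonneg d (by norm_num : (2:Int) ≠ 0)
  have h2 := Int.emod_lt_of_pos d (by norm_num : (0:Int) < 2)
  unfold pvBit; omega

lemma pvBit_bxor {a b : Int} (ha : pvBit a) (hb : pvBit b) : pvBit (PySem.Int.bxor a b) := by
  rcases ha with ha | ha <;> rcases hb with hb | hb <;> subst ha <;> subst hb <;>
    unfold pvBit <;> decide

lemma pvBit_zero_bxor {b : Int} : PySem.Int.bxor 0 b = b := by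
  rw [PySem.Int.bxor_comm, PySem.Int.bxor_zero]

lemma pvBit_bxor_assoc {a b c : Int} (ha : pvBit a) (hb : pvBit b) (hc : pvBit c) :
    PySem.Int.bxor (PySem.Int.bxor a b) c = PySem.Int.bxor a (PySem.Int.bxor b c) := by
  rcases ha with ha | ha <;> rcases hb with hb | hb <;> rcases hc with hc | hc <;>
    subst ha <;> subst hb <;> subst hc <;> decide

-- pvParityAux always returns a bit
lemma pvParityAux_bit (q : Int) : ∀ (fuel : Nat) (x s : Int), 0 ≤ x → x.toNat ≤ fuel →
    pvBit s → pvBit (pvParityAux q x s) := by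
  intro fuel
  induction fuel with
  | zero =>
    intro x s h0 hf hs
    have hx : x = 0 := by omega
    subst hx
    rw [pvParityAux, if_neg (by omega)]
    exact hs
  | succ f ih =>
    intro x s h0 hf hs
    rw [pvParityAux]
    split
    · rename_i hg
      have hfd : PySem.Int.floordiv x q = x / q := PySem.Int.floordiv_eq_ediv_of_pos (by omega)
      have hlt : x / q < x := by
        apply Int.ediv_lt_of_lt_mul (by omega)
        nlinarith [hg.1, hg.2]
      have hpos : 0 ≤ x / q := Int.ediv_nonneg h0 (by omega)
      rw [hfd]
      exact ih (x / q) _ hpos (by omega) (pvBit_bxor hs (pvBit_band _))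
    · exact hs

-- accumulator form of the parity loop
lemma pvParityAux_acc (q : Int) : ∀ (fuel : Nat) (x s : Int), 0 ≤ x → x.toNat ≤ fuel →
    pvBit s → pvParityAux q x s = PySem.Int.bxor s (pvParityAux q x 0) := by
  intro fuel
  induction fuel with
  | zero =>
    intro x s h0 hf hs
    have hx : x = 0 := by omega
    subst hx
    rw [pvParityAux, if_neg (by omega), pvParityAux, if_neg (by omega), PySem.Int.bxor_zero]
  | succ f ih =>
    intro x s h0 hf hs
    by_cases hg : 0 < x ∧ 1 < q
    · have hfd : PySem.Int.floordiv x q = x / q := PySem.Int.floordiv_eq_ediv_of_pos (by omega)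
      have hlt : x / q < x := by
        apply Int.ediv_lt_of_lt_mul (by omega)
        nlinarith [hg.1, hg.2]
      have hpos : 0 ≤ x / q := Int.ediv_nonneg h0 (by omega)
      have hb := pvBit_band (PySem.Int.mod x q)
      conv_lhs => rw [pvParityAux, if_pos hg]
      conv_rhs => rw [pvParityAux, if_pos hg]
      rw [hfd, ih (x / q) _ hpos (by omega) (pvBit_bxor hs hb),
          ih (x / q) _ hpos (by omega) (pvBit_bxor (Or.inl rfl) hb), pvBit_zero_bxor]
      exact pvBit_bxor_assoc hs hb
        (pvParityAux_bit q (x / q).toNat (x / q) 0 hpos (le_refl _) (Or.inl rfl))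
    · rw [pvParityAux, if_neg hg, pvParityAux, if_neg hg, PySem.Int.bxor_zero]

-- bottom peel of the digit parity (holds for every 0 < q, including q = 1 and x = 0)
lemma pvDpar_peel (q x : Int) (hq : 0 < q) (h0 : 0 ≤ x) :
    pvParityAux q x 0 = PySem.Int.bxor (PySem.Int.band (x % q) 1) (pvParityAux q (x / q) 0) := by
  by_cases hg : 0 < x ∧ 1 < q
  · have hfd : PySem.Int.floordiv x q = x / q := PySem.Int.floordiv_eq_ediv_of_pos (by omega)
    have hmd : PySem.Int.mod x q = x % q := PySem.Int.mod_eq_emod_of_pos (by omega)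
    have hpos : 0 ≤ x / q := Int.ediv_nonneg h0 (by omega)
    conv_lhs => rw [pvParityAux, if_pos hg]
    rw [hfd, hmd, pvParityAux_acc q (x / q).toNat (x / q) _ hpos (le_refl _)
         (pvBit_bxor (Or.inl rfl) (pvBit_band _)), pvBit_zero_bxor]
  · by_cases hx : x = 0
    · subst hx
      rw [pvParityAux, if_neg (by omega)]
      simp only [Int.zero_emod, Int.zero_ediv]
      rw [pvParityAux, if_neg (by omega)]
      decide
    · -- q = 1 and x > 0
      have hq1 : q = 1 := by omega
      subst hq1
      have hz : pvParityAux 1 x 0 = 0 := by rw [pvParityAux, if_neg (by omega)]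
      simp only [Int.emod_one, Int.ediv_one, hz]
      decide

-- digit parity of a single digit
lemma pvDpar_small (q x : Int) (hq : 0 < q) (h0 : 0 ≤ x) (h1 : x < q) :
    pvParityAux q x 0 = PySem.Int.band x 1 := by
  rw [pvDpar_peel q x hq h0, Int.emod_eq_of_lt h0 h1, Int.ediv_eq_zero_of_lt h0 h1,
      pvParityAux, if_neg (by omega), PySem.Int.bxor_zero]

-- (a % q^(k+1)) / q = (a / q) % q^k
lemma pv_modpow_div (q : Int) (hq : 0 < q) (a : Int) (k : Nat) :
    a % q ^ (k + 1) / q = a / q % q ^ k := by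
  have h1 : q ^ (k + 1) = q ^ k * q := pow_succ q k
  rw [h1, Int.emod_def]
  have h2 : a - q ^ k * q * (a / (q ^ k * q)) = a + (-(q ^ k * (a / (q ^ k * q)))) * q := by ring
  rw [h2, Int.add_mul_ediv_right _ _ (by omega : q ≠ 0), Int.emod_def,
      show a / (q ^ k * q) = a / q / q ^ k from by
        rw [Int.ediv_ediv_of_nonneg (by omega : (0:Int) ≤ q), mul_comm]]
  ring

-- top peel of the digit parity: for 0 ≤ y < q^(k+1), the top digit splits off
lemma pvDpar_top (q : Int) (hq : 0 < q) : ∀ (k : Nat) (y : Int), 0 ≤ y → y < q ^ (k + 1) →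
    pvParityAux q y 0
      = PySem.Int.bxor (PySem.Int.band (y / q ^ k) 1) (pvParityAux q (y % q ^ k) 0) := by
  intro k
  induction k with
  | zero =>
    intro y h0 h1
    rw [pow_one] at h1
    rw [pvDpar_small q y hq h0 h1, pow_zero, Int.ediv_one, Int.emod_one,
        pvParityAux, if_neg (by omega), PySem.Int.bxor_zero]
  | succ k ih =>
    intro y h0 h1
    have hpk : (0:Int) < q ^ k := pow_pos hq k
    have hpk1 : (0:Int) < q ^ (k + 1) := pow_pos hq (k + 1)
    have hyq0 : 0 ≤ y / q := Int.ediv_nonneg h0 (by omega)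
    have hyq1 : y / q < q ^ (k + 1) := by
      rw [Int.ediv_lt_iff_lt_mul (by omega)]
      calc y < q ^ (k + 1 + 1) := h1
        _ = q ^ (k + 1) * q := pow_succ q (k + 1)
    have hB0 := pvBit_band (y % q)
    have hBtop := pvBit_band (y / q ^ (k + 1))
    have hD1 : pvBit (pvParityAux q (y / q % q ^ k) 0) := by
      refine pvParityAux_bit q (y / q % q ^ k).toNat _ 0 ?_ (le_refl _) (Or.inl rfl)
      exact Int.emod_nonneg _ (by omega)
    rw [pvDpar_peel q y hq h0, ih (y / q) hyq0 hyq1,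
        Int.ediv_ediv_of_nonneg (by omega : (0:Int) ≤ q), ← pow_succ',
        pvDpar_peel q (y % q ^ (k + 1)) hq (Int.emod_nonneg _ (by omega)),
        Int.emod_emod_of_dvd y (dvd_pow_self q (by omega : k + 1 ≠ 0)),
        pv_modpow_div q hq y k]
    rw [← pvBit_bxor_assoc hB0 hBtop hD1, PySem.Int.bxor_comm (PySem.Int.band (y % q) 1),
        pvBit_bxor_assoc hBtop hB0 hD1]

-- the value list A computes (LSB first), peeling the TOP digit
def pvVals (q : Int) : Nat → Int → Int → List Int
  | k, rem, parity =>
    let p : Int := q ^ k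
    let dk := PySem.Int.floordiv rem p
    let rem' := PySem.Int.mod rem p
    let a := if parity == 0 then dk else (q - 1) - dk
    let parity' := PySem.Int.bxor parity (PySem.Int.band dk 1)
    match k with
    | 0 => [a]
    | k' + 1 => pvVals q k' rem' parity' ++ [a]

lemma pvVals_length (q : Int) : ∀ (k : Nat) (rem p : Int), (pvVals q k rem p).length = k + 1 := by
  intro k
  induction k with
  | zero => intro rem p; simp [pvVals]
  | succ k' ih => intro rem p; simp [pvVals, ih]

lemma pvVals_mem_range (q : Int) (hq : 0 < q) : ∀ (k : Nat) (rem p : Int),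
    0 ≤ rem → rem < q ^ (k + 1) → ∀ v ∈ pvVals q k rem p, 0 ≤ v ∧ v < q := by
  intro k
  induction k with
  | zero =>
    intro rem p h0 h1 v hv
    rw [pow_one] at h1
    simp [pvVals] at hv
    subst hv
    split <;> constructor <;> omega
  | succ k' ih =>
    intro rem p h0 h1 v hv
    have hpw : (0:Int) < q ^ (k' + 1) := pow_pos hq _
    have hdk0 : 0 ≤ rem / q ^ (k' + 1) := Int.ediv_nonneg h0 (le_of_lt hpw)
    have hdkq : rem / q ^ (k' + 1) < q := by
      rw [Int.ediv_lt_iff_lt_mul hpw]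
      calc rem < q ^ (k' + 1 + 1) := h1
        _ = q * q ^ (k' + 1) := by ring
    simp only [pvVals, List.mem_append, List.mem_singleton,
      PySem.Int.mod_eq_emod_of_pos hpw, PySem.Int.floordiv_eq_ediv_of_pos hpw] at hv
    rcases hv with hv | hv
    · exact ih _ _ (Int.emod_nonneg rem (ne_of_gt hpw)) (Int.emod_lt_of_pos rem hpw) v hv
    · subst hv
      split <;> constructor <;> omega

-- digit-from-remainder facts
lemma pv_mod_pow_div (q : Int) (hq : 0 < q) (a : Int) (m : Nat) :
    a % q ^ (m + 1) / q ^ m = a / q ^ m % q := by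
  have hp : (0:Int) < q ^ m := pow_pos hq m
  have h1 : q ^ (m + 1) = q ^ m * q := pow_succ q m
  have ht : a / (q ^ m * q) = a / q ^ m / q := (Int.ediv_ediv_of_nonneg (le_of_lt hp)).symm
  rw [h1, Int.emod_def]
  have : a - q ^ m * q * (a / (q ^ m * q)) = a + (-(q * (a / (q ^ m * q)))) * q ^ m := by ring
  rw [this, Int.add_mul_ediv_right _ _ (ne_of_gt hp), ht, Int.emod_def]
  ring

lemma pv_mod_pow_mod (q a : Int) (m : Nat) :
    a % q ^ (m + 1) % q ^ m = a % q ^ m :=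
  Int.emod_emod_of_dvd a (pow_dvd_pow q (Nat.le_succ m))

-- A's first loop computes the base-q digit list and the running quotient
lemma pv_digits_loop (q : Int) (hq : 0 < q) (x : Int) : ∀ (m : Nat),
    ((PySem.List.pyRange 0 (m : Int) 1).foldl
      (fun (st : List Int × Int) _ =>
        (st.1 ++ [PySem.Int.mod st.2 q], PySem.Int.floordiv st.2 q)) ([], x))
    = ((List.range m).map (fun j => x / q ^ j % q), x / q ^ m) := by
  intro m
  induction m with
  | zero => simp
  | succ m ih =>
    have hcast : ((m + 1 : Nat) : Int) = (m : Int) + 1 := by push_cast; ring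
    rw [hcast, PySem.List.pyRange_one_succ_right (by positivity), List.foldl_append, ih]
    simp only [List.foldl_cons, List.foldl_nil, List.range_succ, List.map_append, List.map_cons,
      List.map_nil, PySem.Int.mod_eq_emod_of_pos hq, PySem.Int.floordiv_eq_ediv_of_pos hq]
    refine Prod.ext ?_ ?_
    · simp
    · simp only
      rw [Int.ediv_ediv_of_nonneg (le_of_lt (pow_pos hq m)) ]
      rw [← pow_succ]

-- A's downward parity pass fills the array with exactly the gray values pvVals
lemma pv_parity_loop (q i : Int) (hq : 0 < q) (d : List Int)
    (hd : ∀ k : Nat, k < d.length → d.getD k 0 = i / q ^ k % q) :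
    ∀ (m : Nat) (a : List Int) (p : Int), m < a.length → m < d.length →
    ((PySem.List.pyRange (m : Int) (-1) (-1)).foldl
       (fun (st : List Int × Int) k =>
          (PySem.List.pySetD st.1 k
             (if st.2 == 0 then PySem.List.pyGetD d k 0 else q - 1 - PySem.List.pyGetD d k 0),
           PySem.Int.bxor st.2 (PySem.Int.band (PySem.List.pyGetD d k 0) 1)))
       (a, p)).1
    = pvVals q m (i % q ^ (m + 1)) p ++ a.drop (m + 1) := by
  intro m
  induction m with
  | zero =>
    intro a p ha hdlen
    rw [PySem.List.pyRange_neg_one_cons (by omega),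
        show ((0:Nat):Int) - 1 = -1 by norm_num, PySem.List.pyRange_neg_one_eq_nil (le_refl _)]
    simp only [List.foldl_cons, List.foldl_nil]
    have hd0 : PySem.List.pyGetD d (0 : Int) 0 = i % q := by
      rw [PySem.List.pyGetD_zero]
      have := hd 0 hdlen
      simpa using this
    have hset : PySem.List.pySetD a (0 : Int) ((if p == 0 then i % q else q - 1 - (i % q))) =
        (if p == 0 then i % q else q - 1 - (i % q)) :: a.drop 1 := by
      rcases a with _ | ⟨x, t⟩
      · simp at ha
      · have := PySem.List.pySetD_natCast (xs := x :: t) (n := 0)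
          (v := (if p == 0 then i % q else q - 1 - (i % q)))
        simpa using this
    simp only [Nat.cast_zero, hd0]
    rw [hset]
    simp [pvVals]
  | succ m ih =>
    intro a p ha hdlen
    have hpw : (0:Int) < q ^ (m + 1) := pow_pos hq _
    rw [show ((m + 1 : Nat) : Int) = (m : Int) + 1 by push_cast; ring,
        PySem.List.pyRange_neg_one_cons (by omega),
        show ((m : Int) + 1 - 1) = (m : Int) by ring]
    simp only [List.foldl_cons]
    have hdm : PySem.List.pyGetD d ((m : Int) + 1) 0 = i / q ^ (m + 1) % q := by
      rw [show ((m : Int) + 1) = ((m + 1 : Nat) : Int) by push_cast; ring,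
          PySem.List.pyGetD_natCast]
      exact hd (m + 1) hdlen
    have hsetD : PySem.List.pySetD a ((m : Int) + 1)
        (if p == 0 then i / q ^ (m + 1) % q else q - 1 - (i / q ^ (m + 1) % q)) =
        a.set (m + 1) (if p == 0 then i / q ^ (m + 1) % q else q - 1 - (i / q ^ (m + 1) % q)) := by
      rw [show ((m : Int) + 1) = ((m + 1 : Nat) : Int) by push_cast; ring,
          PySem.List.pySetD_natCast]
    simp only [hdm, hsetD]
    rw [ih _ _ (by simp; omega) (by omega)]
    have hdrop : (a.set (m + 1) (if p == 0 then i / q ^ (m + 1) % q else q - 1 - (i / q ^ (m + 1) % q))).drop (m + 1)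
        = (if p == 0 then i / q ^ (m + 1) % q else q - 1 - (i / q ^ (m + 1) % q)) :: a.drop (m + 2) := by
      rw [List.drop_set, if_neg (lt_irrefl _), Nat.sub_self,
          List.drop_eq_getElem_cons (by omega : m + 1 < a.length), List.set_cons_zero]
    rw [hdrop]
    -- unfold pvVals at m+1 on the RHS
    conv_rhs => rw [pvVals]
    simp only [PySem.Int.floordiv_eq_ediv_of_pos hpw, PySem.Int.mod_eq_emod_of_pos hpw,
      pv_mod_pow_div q hq i (m + 1), pv_mod_pow_mod]
    rw [List.append_assoc]
    simp

-- setting bit v of a row of q zeros is B's '0'*v + '1' + '0'*(q-1-v)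
lemma pv_onehot_set (q v : Int) (h0 : 0 ≤ v) (h1 : v < q) :
    String.ofList (PySem.List.pySetD (List.replicate q.toNat '0') v '1') = pvOnehot q v := by
  rw [PySem.List.pySetD_of_nonneg _ _ h0, pvOnehot]
  congr 1
  have hq : q.toNat = v.toNat + (1 + (q - 1 - v).toNat) := by omega
  rw [hq, List.replicate_add, List.replicate_add]
  rw [List.set_append_right _ _ (by simp)]
  simp [List.replicate_succ]

-- A's third loop maps pvOnehot over the value list
lemma pv_blocks_loop (q : Int) (vals : List Int)
    (hv : ∀ v ∈ vals, 0 ≤ v ∧ v < q) :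
    ((PySem.List.pyRange 0 ((vals.length : Nat) : Int) 1).foldl
      (fun (bs : List String) k =>
        bs ++ [String.ofList (PySem.List.pySetD (List.replicate q.toNat '0')
                 (PySem.List.pyGetD vals k 0) '1')]) [])
    = vals.map (pvOnehot q) := by
  rw [PySem.List.foldl_append_singleton_eq_map, List.nil_append]
  have h1 : (PySem.List.pyRange 0 (vals.length : Int) 1).map
      (fun k => String.ofList (PySem.List.pySetD (List.replicate q.toNat '0')
                 (PySem.List.pyGetD vals k 0) '1'))
      = ((PySem.List.pyRange 0 (vals.length : Int) 1).map
          (fun k => PySem.List.pyGetD vals k 0)).map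
        (fun v => String.ofList (PySem.List.pySetD (List.replicate q.toNat '0') v '1')) := by
    rw [List.map_map]; rfl
  rw [h1, PySem.List.map_pyGetD_pyRange_zero']
  apply List.map_congr_left
  intro v hvv
  exact pv_onehot_set q v (hv v hvv).1 (hv v hvv).2

-- ---- B-side lemmas ----

-- the value list B computes (LSB first), peeling the BOTTOM digit
def pvBVals (q : Int) : Nat → Int → Int → List Int
  | 0, _, _ => []
  | m + 1, x, s =>
    let d := PySem.Int.mod x q
    let s' := PySem.Int.bxor s (PySem.Int.band d 1)
    (if s' == 0 then d else (q - 1) - d) :: pvBVals q m (PySem.Int.floordiv x q) s'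

-- a fold whose function ignores the elements is an iterate of the state map
lemma pv_foldl_ignore {α β : Type} (g : α → α) :
    ∀ (l : List β) (st : α), l.foldl (fun st _ => g st) st = g^[l.length] st := by
  intro l
  induction l with
  | nil => intro st; simp
  | cons a t ih =>
    intro st
    simp only [List.foldl_cons, List.length_cons, ih, Function.iterate_succ_apply]

-- B's forward loop emits the pvOnehot blocks of pvBVals
lemma pv_bloop (q : Int) : ∀ (m : Nat) (pieces : List String) (x s : Int),
    ((PySem.List.pyRange 0 (m : Int) 1).foldl
      (fun (st : List String × Int × Int) _ =>
        (st.1 ++ [pvOnehot q (if PySem.Int.bxor st.2.2 (PySem.Int.band (PySem.Int.mod st.2.1 q) 1) == 0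
                   then PySem.Int.mod st.2.1 q else (q - 1) - PySem.Int.mod st.2.1 q)],
         PySem.Int.floordiv st.2.1 q,
         PySem.Int.bxor st.2.2 (PySem.Int.band (PySem.Int.mod st.2.1 q) 1)))
      (pieces, x, s)).1
    = pieces ++ (pvBVals q m x s).map (pvOnehot q) := by
  intro m
  induction m with
  | zero =>
    intro pieces x s
    rw [show ((0:Nat):Int) = (0:Int) from rfl, PySem.List.pyRange_one_eq_nil (le_refl _)]
    simp [pvBVals]
  | succ m ih =>
    intro pieces x s
    rw [show ((m + 1 : Nat) : Int) = 0 + ((m:Int) + 1) by push_cast; ring,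
        PySem.List.pyRange_one_cons (by omega)]
    simp only [List.foldl_cons]
    rw [pv_foldl_ignore, show (PySem.List.pyRange (0 + 1) (0 + ((m:Int) + 1)) 1).length
          = (PySem.List.pyRange 0 ((m:Int)) 1).length by
            rw [PySem.List.length_pyRange_one, PySem.List.length_pyRange_one]; omega,
        ← pv_foldl_ignore, ih]
    simp only [pvBVals, List.map_cons, List.append_assoc, List.cons_append, List.nil_append]

-- bottom peel of pvVals: under a genuine-digit bound, the LSB splits off
lemma pvVals_peel (q : Int) (hq : 0 < q) : ∀ (k : Nat) (rem p : Int),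
    0 ≤ rem → rem < q ^ (k + 2) → pvBit p →
    pvVals q (k + 1) rem p
      = (if PySem.Int.bxor p (pvParityAux q (rem / q) 0) == 0 then rem % q
         else (q - 1) - rem % q) :: pvVals q k (rem / q) p := by
  intro k
  induction k with
  | zero =>
    intro rem p h0 h1 hp
    have hq1 : (0:Int) < q ^ 1 := by rw [pow_one]; omega
    have hd1 : rem / q < q := by
      rw [Int.ediv_lt_iff_lt_mul (by omega)]
      calc rem < q ^ 2 := h1
        _ = q * q := sq q
    have hd0 : 0 ≤ rem / q := Int.ediv_nonneg h0 (by omega)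
    conv_lhs => rw [pvVals]
    simp only [pow_one, PySem.Int.floordiv_eq_ediv_of_pos (by omega : (0:Int) < q),
      PySem.Int.mod_eq_emod_of_pos (by omega : (0:Int) < q)]
    conv_lhs => rw [pvVals]
    simp only [pow_zero, PySem.Int.floordiv_eq_ediv_of_pos (by norm_num : (0:Int) < 1),
      Int.ediv_one]
    conv_rhs => rw [pvVals]
    simp only [pow_zero, PySem.Int.floordiv_eq_ediv_of_pos (by norm_num : (0:Int) < 1),
      Int.ediv_one]
    rw [pvDpar_small q (rem / q) hq hd0 hd1]
    rfl
  | succ k ih =>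
    intro rem p h0 h1 hp
    have hpk2 : (0:Int) < q ^ (k + 2) := pow_pos hq _
    have hrem'0 : 0 ≤ rem % q ^ (k + 2) := Int.emod_nonneg _ (by omega)
    have hrem'1 : rem % q ^ (k + 2) < q ^ (k + 2) := Int.emod_lt_of_pos _ hpk2
    have hd := pvBit_band (rem / q ^ (k + 2))
    have hp' : pvBit (PySem.Int.bxor p (PySem.Int.band (rem / q ^ (k + 2)) 1)) :=
      pvBit_bxor hp hd
    -- unfold the top level on the left
    conv_lhs => rw [pvVals]
    simp only [PySem.Int.floordiv_eq_ediv_of_pos hpk2, PySem.Int.mod_eq_emod_of_pos hpk2]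
    rw [ih (rem % q ^ (k + 2)) _ hrem'0 hrem'1 hp']
    -- unfold the top level of pvVals (k+1) (rem/q) p on the right
    conv_rhs => rw [pvVals]
    have hpk1 : (0:Int) < q ^ (k + 1) := pow_pos hq _
    simp only [PySem.Int.floordiv_eq_ediv_of_pos hpk1, PySem.Int.mod_eq_emod_of_pos hpk1]
    have he1 : rem / q / q ^ (k + 1) = rem / q ^ (k + 2) := by
      rw [Int.ediv_ediv_of_nonneg (by omega : (0:Int) ≤ q), ← pow_succ']
    have he2 : rem / q % q ^ (k + 1) = rem % q ^ (k + 2) / q := (pv_modpow_div q hq rem (k + 1)).symm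
    have he3 : rem % q ^ (k + 2) % q = rem % q :=
      Int.emod_emod_of_dvd rem (dvd_pow_self q (by omega : k + 2 ≠ 0))
    have he4 : rem % q ^ (k + 2) / q = rem / q % q ^ (k + 1) := pv_modpow_div q hq rem (k + 1)
    rw [he1, he2, he3, he4]
    -- heads agree: parity above digit 0
    have hDtop := pvDpar_top q hq (k + 1) (rem / q)
      (Int.ediv_nonneg h0 (by omega))
      (by rw [Int.ediv_lt_iff_lt_mul (by omega)]
          calc rem < q ^ (k + 3) := h1
            _ = q ^ (k + 2) * q := pow_succ q (k + 2))
    rw [he1] at hDtop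
    have hD2 : pvBit (pvParityAux q (rem / q % q ^ (k + 1)) 0) := by
      refine pvParityAux_bit q (rem / q % q ^ (k + 1)).toNat _ 0 ?_ (le_refl _) (Or.inl rfl)
      exact Int.emod_nonneg _ (by omega)
    have hpar : PySem.Int.bxor (PySem.Int.bxor p (PySem.Int.band (rem / q ^ (k + 2)) 1))
          (pvParityAux q (rem / q % q ^ (k + 1)) 0)
        = PySem.Int.bxor p (pvParityAux q (rem / q) 0) := by
      rw [hDtop, ← pvBit_bxor_assoc hp hd hD2]
    rw [hpar]
    simp

-- the bridge: B's LSB-first list equals A's value list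
lemma pv_bridge (q : Int) (hq : 0 < q) : ∀ (m : Nat) (rem p : Int),
    0 ≤ rem → rem < q ^ (m + 1) → pvBit p →
    pvBVals q (m + 1) rem (PySem.Int.bxor p (pvParityAux q rem 0)) = pvVals q m rem p := by
  intro m
  induction m with
  | zero =>
    intro rem p h0 h1 hp
    rw [pow_one] at h1
    rw [pvBVals]
    simp only [PySem.Int.mod_eq_emod_of_pos (by omega : (0:Int) < q),
      PySem.Int.floordiv_eq_ediv_of_pos (by omega : (0:Int) < q)]
    rw [Int.emod_eq_of_lt h0 h1, pvDpar_small q rem hq h0 h1,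
        pvBit_bxor_assoc hp (pvBit_band rem) (pvBit_band rem),
        show PySem.Int.bxor (PySem.Int.band rem 1) (PySem.Int.band rem 1) = 0 from
          PySem.Int.bxor_self _, PySem.Int.bxor_zero]
    rw [pvVals]
    simp only [pow_zero, PySem.Int.floordiv_eq_ediv_of_pos (by norm_num : (0:Int) < 1),
      Int.ediv_one]
    simp [pvBVals]
  | succ m ih =>
    intro rem p h0 h1 hp
    have hDq : pvBit (pvParityAux q (rem / q) 0) := by
      refine pvParityAux_bit q (rem / q).toNat _ 0 (Int.ediv_nonneg h0 (by omega)) (le_refl _)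
        (Or.inl rfl)
    rw [pvBVals]
    simp only [PySem.Int.mod_eq_emod_of_pos (by omega : (0:Int) < q),
      PySem.Int.floordiv_eq_ediv_of_pos (by omega : (0:Int) < q)]
    have hs' : PySem.Int.bxor (PySem.Int.bxor p (pvParityAux q rem 0))
          (PySem.Int.band (rem % q) 1)
        = PySem.Int.bxor p (pvParityAux q (rem / q) 0) := by
      rw [pvDpar_peel q rem hq h0]
      rcases hp with hp | hp <;> rcases pvBit_band (rem % q) with hb | hb <;>
        rcases hDq with hd | hd <;> rw [hp, hb, hd] <;> decide
    rw [hs']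
    have hq0 : 0 ≤ rem / q := Int.ediv_nonneg h0 (by omega)
    have hq1 : rem / q < q ^ (m + 1) := by
      rw [Int.ediv_lt_iff_lt_mul (by omega)]
      calc rem < q ^ (m + 2) := h1
        _ = q ^ (m + 1) * q := pow_succ q (m + 1)
    rw [ih (rem / q) p hq0 hq1 hp,
        pvVals_peel q hq m rem p h0 h1 hp]

-- ===== VERDICT (by name: the statement is the Claim_ definition above) =====
theorem ith_gray_onehot_spec : Claim_equal_ith_gray_onehot := by
  intro n q i reverse _ hpre
  obtain ⟨hn, hq, hi0, hiq⟩ := hpre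
  obtain ⟨N, rfl⟩ : ∃ N : Nat, n = (N : Int) := ⟨n.toNat, (Int.toNat_of_nonneg (by omega)).symm⟩
  have hN1 : 1 ≤ N := by omega
  have hg1 : ¬ ((N:Int) ≤ 0 ∨ q ≤ 0) := by rintro (h | h) <;> omega
  rw [Int.toNat_natCast] at hiq
  have hg2 : ¬ (i < 0 ∨ i ≥ q ^ N) := by
    rintro (h | h) <;> omega
  unfold Spec_ith_gray_onehot
  simp only [ith_gray_onehot, ith_gray_onehot_alt, Int.toNat_natCast, if_neg hg1, if_neg hg2]
  rw [pv_digits_loop q hq i N]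
  have hfix : (List.map (fun j => i / q ^ j % q) (List.range N), i / q ^ N).1
      = List.map (fun j => i / q ^ j % q) (List.range N) := rfl
  rw [hfix, show ((N:Int) - 1) = ((N - 1 : Nat) : Int) by omega]
  have hd : ∀ k : Nat, k < (List.map (fun j => i / q ^ j % q) (List.range N)).length →
      (List.map (fun j => i / q ^ j % q) (List.range N)).getD k 0 = i / q ^ k % q := by
    intro k hk
    simp only [List.length_map, List.length_range] at hk
    exact PySem.List.getD_map_range _ N k 0 hk
  rw [pv_parity_loop q i hq _ hd (N - 1) (List.replicate N 0) 0 (by simp; omega)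
        (by simp; omega)]
  have hN' : N - 1 + 1 = N := by omega
  rw [hN', Int.emod_eq_of_lt hi0 hiq, List.drop_replicate, Nat.sub_self, List.replicate_zero,
      List.append_nil]
  have hvm : ∀ v ∈ pvVals q (N - 1) i 0, 0 ≤ v ∧ v < q :=
    pvVals_mem_range q hq (N - 1) i 0 hi0 (by rw [hN']; exact hiq)
  rw [show ((N:Int)) = ((pvVals q (N - 1) i 0).length : Int) by rw [pvVals_length]; omega,
      pv_blocks_loop q _ hvm]
  -- B side
  rw [show ((pvVals q (N - 1) i 0).length : Int) = ((N:Nat) : Int) by rw [pvVals_length]; omega]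
  rw [pv_bloop q N [] i (pvParityAux q i 0), List.nil_append]
  have hs0 : pvParityAux q i 0 = PySem.Int.bxor 0 (pvParityAux q i 0) := pvBit_zero_bxor.symm
  have hb : pvBVals q N i (PySem.Int.bxor 0 (pvParityAux q i 0)) = pvVals q (N - 1) i 0 := by
    rw [show N = (N - 1) + 1 by omega]
    exact pv_bridge q hq (N - 1) i 0 hi0 (by rw [hN']; exact hiq) (Or.inl rfl)
  rw [hs0, hb]
  cases reverse
  · simp only [Bool.false_eq_true, if_false]
    rw [PySem.Str.slice?_none_none_neg_one]
    simp only [Option.getD_some]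
  · simp only [if_true]
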